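-- pv_equiv track=rewrite | github.com/pbtamarona/methanepyrolysis | simulation.py | get_temp_values
-- ===== SOURCE A (Python) =====
-- def get_temp_values(reactor_temp, reactor_type):
--     cstr_ranges = [
--         (575, 45, 100, 210),
--         (600, 45, 95, 190),
--         (625, 45, 90, 190),
--         (650, 50, 85, 200), # (650, 50, 85, 200)
--         (675, 50, 80, 220),
--         (700, 50, 80, 240)
--     ]
--
--     pfr_ranges = [
--         (575, 45, 100, 210),
--         (600, 45, 95, 190),
--         (625, 45, 90, 190),
--         (650, 50, 85, 200), # (650, 50, 85, 200)
--         (675, 50, 80, 230),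
--         (700, 60, 80, 280)
--     ]
--
--     if reactor_type == 'PFR':
--         for max_temp, hx1_value, hx2_temp, hx3_temp in pfr_ranges:
--             if reactor_temp <= max_temp:
--                 return hx1_value, hx2_temp, hx3_temp
--     elif reactor_type == 'CSTR':
--         for max_temp, hx1_value, hx2_temp, hx3_temp in cstr_ranges:
--             if reactor_temp <= max_temp:
--                 return hx1_value, hx2_temp, hx3_temp
--
--     raise ValueError("Invalid reactor temperature")
-- ===== SOURCE B (Python) =====
-- def get_temp_values(reactor_temp, reactor_type):
--     if reactor_type == 'PFR':
--         vals = [(45, 100, 210), (45, 95, 190), (45, 90, 190),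
--                 (50, 85, 200), (50, 80, 230), (60, 80, 280)]
--     elif reactor_type == 'CSTR':
--         vals = [(45, 100, 210), (45, 95, 190), (45, 90, 190),
--                 (50, 85, 200), (50, 80, 220), (50, 80, 240)]
--     else:
--         raise ValueError("Invalid reactor temperature")
--     thresholds = [575, 600, 625, 650, 675, 700]
--     lo, hi = 0, 6
--     while lo < hi:  # bisect_left over the sorted thresholds
--         mid = (lo + hi) // 2
--         if thresholds[mid] < reactor_temp:
--             lo = mid + 1
--         else:
--             hi = mid
--     if lo < 6:
--         return vals[lo]
--     raise ValueError("Invalid reactor temperature")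
-- ===== Notes on version B (the rewrite author's own statement) =====
-- stated objective: alternative
-- what changed: Replaces the linear first-match scan over tuples of (max_temp, values) with a hand-written bisect_left binary search over the separated sorted threshold list, indexing into a per-type value table.
import Mathlib
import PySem

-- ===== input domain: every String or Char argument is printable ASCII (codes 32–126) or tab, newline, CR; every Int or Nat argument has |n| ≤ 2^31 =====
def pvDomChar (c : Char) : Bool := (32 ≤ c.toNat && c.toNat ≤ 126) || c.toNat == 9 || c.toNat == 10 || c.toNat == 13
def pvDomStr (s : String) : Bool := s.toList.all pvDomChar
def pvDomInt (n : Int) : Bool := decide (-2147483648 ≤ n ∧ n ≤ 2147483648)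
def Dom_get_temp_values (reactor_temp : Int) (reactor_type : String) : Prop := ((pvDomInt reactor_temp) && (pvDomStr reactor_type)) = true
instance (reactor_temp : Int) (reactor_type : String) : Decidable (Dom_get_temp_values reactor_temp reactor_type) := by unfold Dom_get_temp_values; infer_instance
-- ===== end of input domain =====

-- B replaces A's linear first-match scan with a bisect_left binary search over the
-- separated sorted threshold list (alternative structure, not claimed faster).

-- ===== PORT A =====
def pvCstrRanges : List (Int × Int × Int × Int) :=
  [(575, 45, 100, 210), (600, 45, 95, 190), (625, 45, 90, 190),
   (650, 50, 85, 200), (675, 50, 80, 220), (700, 50, 80, 240)]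

def pvPfrRanges : List (Int × Int × Int × Int) :=
  [(575, 45, 100, 210), (600, 45, 95, 190), (625, 45, 90, 190),
   (650, 50, 85, 200), (675, 50, 80, 230), (700, 60, 80, 280)]

-- A's for-loop: first row with reactor_temp ≤ max_temp; none = the ValueError path.
def pvScan (t : Int) : List (Int × Int × Int × Int) → Option (Int × Int × Int)
  | [] => none
  | (m, a, b, c) :: rest => if t ≤ m then some (a, b, c) else pvScan t rest

def get_temp_values (reactor_temp : Int) (reactor_type : String) : Int × Int × Int :=
  if reactor_type == "PFR" then
    (pvScan reactor_temp pvPfrRanges).getD (0, 0, 0)   -- none is excluded by Pre_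
  else if reactor_type == "CSTR" then
    (pvScan reactor_temp pvCstrRanges).getD (0, 0, 0)
  else (0, 0, 0)   -- ValueError path, excluded by Pre_

-- ===== PORT B =====
def pvThresholds : List Int := [575, 600, 625, 650, 675, 700]

def pvPfrVals : List (Int × Int × Int) :=
  [(45, 100, 210), (45, 95, 190), (45, 90, 190), (50, 85, 200), (50, 80, 230), (60, 80, 280)]

def pvCstrVals : List (Int × Int × Int) :=
  [(45, 100, 210), (45, 95, 190), (45, 90, 190), (50, 85, 200), (50, 80, 220), (50, 80, 240)]

-- Source B's while-loop bisect_left; fuel bounds the iterations (6 suffices for hi - lo ≤ 6).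
def pvBisect (xs : List Int) (x : Int) : Nat → Nat → Nat → Nat
  | 0, lo, _ => lo
  | fuel + 1, lo, hi =>
    if lo < hi then
      let mid := (lo + hi) / 2
      if xs.getD mid 0 < x then pvBisect xs x fuel (mid + 1) hi
      else pvBisect xs x fuel lo mid
    else lo

def get_temp_values_alt (reactor_temp : Int) (reactor_type : String) : Int × Int × Int :=
  if reactor_type == "PFR" then
    let i := pvBisect pvThresholds reactor_temp 6 0 6
    if i < 6 then pvPfrVals.getD i (0, 0, 0) else (0, 0, 0)   -- ValueError path, excluded by Pre_
  else if reactor_type == "CSTR" then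
    let i := pvBisect pvThresholds reactor_temp 6 0 6
    if i < 6 then pvCstrVals.getD i (0, 0, 0) else (0, 0, 0)
  else (0, 0, 0)   -- ValueError path, excluded by Pre_

-- ===== PRECONDITION & SPEC =====
-- A raises ValueError whenever reactor_type is neither 'PFR' nor 'CSTR', or reactor_temp > 700.
def Pre_get_temp_values (reactor_temp : Int) (reactor_type : String) : Prop :=
  (reactor_type = "PFR" ∨ reactor_type = "CSTR") ∧ reactor_temp ≤ 700
instance (reactor_temp : Int) (reactor_type : String) : Decidable (Pre_get_temp_values reactor_temp reactor_type) := by unfold Pre_get_temp_values; infer_instance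

def pvWitness_get_temp_values : Int × String := (620, "PFR")

def Spec_get_temp_values (reactor_temp : Int) (reactor_type : String) (out : Int × Int × Int) : Prop := out = get_temp_values_alt reactor_temp reactor_type
instance (reactor_temp : Int) (reactor_type : String) (out : Int × Int × Int) : Decidable (Spec_get_temp_values reactor_temp reactor_type out) := by unfold Spec_get_temp_values; infer_instance

-- ===== CLAIM (what is proved, stated in full; the proofs are below) =====
def Claim_equal_get_temp_values : Prop := ∀ (reactor_temp : Int) (reactor_type : String), Dom_get_temp_values reactor_temp reactor_type → Pre_get_temp_values reactor_temp reactor_type → Spec_get_temp_values reactor_temp reactor_type (get_temp_values reactor_temp reactor_type)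

-- ===== LEMMAS AND PROOFS =====

-- On the common threshold table the two searches agree for every in-range temperature.
theorem pv_agree (t : Int) (ht : t ≤ 700) :
    (pvScan t pvPfrRanges).getD (0,0,0)
      = (if pvBisect pvThresholds t 6 0 6 < 6 then pvPfrVals.getD (pvBisect pvThresholds t 6 0 6) (0,0,0) else (0,0,0))
    ∧ (pvScan t pvCstrRanges).getD (0,0,0)
      = (if pvBisect pvThresholds t 6 0 6 < 6 then pvCstrVals.getD (pvBisect pvThresholds t 6 0 6) (0,0,0) else (0,0,0)) := by
  by_cases h1 : t ≤ 575
  · simp [pvScan, pvPfrRanges, pvCstrRanges, pvBisect, pvThresholds, pvPfrVals, pvCstrVals,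
      h1, show ¬(650:Int) < t by omega, show ¬(600:Int) < t by omega, show ¬(575:Int) < t by omega]
  · by_cases h2 : t ≤ 600
    · simp [pvScan, pvPfrRanges, pvCstrRanges, pvBisect, pvThresholds, pvPfrVals, pvCstrVals,
        h1, h2, show ¬(650:Int) < t by omega, show ¬(600:Int) < t by omega, show (575:Int) < t by omega]
    · by_cases h3 : t ≤ 625
      · simp [pvScan, pvPfrRanges, pvCstrRanges, pvBisect, pvThresholds, pvPfrVals, pvCstrVals,
          h1, h2, h3, show ¬(650:Int) < t by omega, show (600:Int) < t by omega, show ¬(625:Int) < t by omega]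
      · by_cases h4 : t ≤ 650
        · simp [pvScan, pvPfrRanges, pvCstrRanges, pvBisect, pvThresholds, pvPfrVals, pvCstrVals,
            h1, h2, h3, h4, show ¬(650:Int) < t by omega, show (600:Int) < t by omega, show (625:Int) < t by omega]
        · by_cases h5 : t ≤ 675
          · simp [pvScan, pvPfrRanges, pvCstrRanges, pvBisect, pvThresholds, pvPfrVals, pvCstrVals,
              h1, h2, h3, h4, h5, show (650:Int) < t by omega, show ¬(675:Int) < t by omega,
              show ¬(700:Int) < t by omega]
          · simp [pvScan, pvPfrRanges, pvCstrRanges, pvBisect, pvThresholds, pvPfrVals, pvCstrVals,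
              h1, h2, h3, h4, h5, ht, show (650:Int) < t by omega, show (675:Int) < t by omega,
              show ¬(700:Int) < t by omega]

-- ===== VERDICT (by name: the statement is the Claim_ definition above) =====
theorem get_temp_values_spec : Claim_equal_get_temp_values := by
  intro t ty _ hpre
  obtain ⟨hty, hle⟩ := hpre
  unfold Spec_get_temp_values get_temp_values get_temp_values_alt
  rcases hty with h | h <;> subst h <;> simp only [beq_self_eq_true, if_true]
  · exact (pv_agree t hle).1
  · exact (pv_agree t hle).2
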